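-- pv_equiv track=rewrite | github.com/poflygogo/randomshit | 01zerojudge/01 基礎題庫/series_o/o087 王子的名字/v1-2.py | Evaluate
-- ===== SOURCE A (Python) =====
-- def Evaluate(Name: str):
--     if(type(Name) != str):
--         return -1
--
--     Score = 0
--     NameLen = len(Name)
--
--     for i in range(NameLen):
--         CharCode = ord(Name[i])
--         Score += ((CharCode * 1123) % 1002)
--
--         while (CharCode > 0):
--             Score += (CharCode % 10)
--             CharCode = (CharCode // 10)
--
--     return (Score % 101)
-- ===== SOURCE B (Python) =====
-- def _digit_sum(n):
--     return sum(int(d) for d in str(n))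
--
-- def Evaluate(Name: str):
--     if type(Name) != str:
--         return -1
--     return sum((ord(ch) * 1123) % 1002 + _digit_sum(ord(ch)) for ch in Name) % 101
-- ===== Notes on version B (the rewrite author's own statement) =====
-- stated objective: idiomatic
-- what changed: Replaces the index loop with mutable accumulator and the arithmetic mod/div digit-extraction while-loop by a single sum over a generator whose digit sum traverses the decimal string representation of the char code.
import Mathlib
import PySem

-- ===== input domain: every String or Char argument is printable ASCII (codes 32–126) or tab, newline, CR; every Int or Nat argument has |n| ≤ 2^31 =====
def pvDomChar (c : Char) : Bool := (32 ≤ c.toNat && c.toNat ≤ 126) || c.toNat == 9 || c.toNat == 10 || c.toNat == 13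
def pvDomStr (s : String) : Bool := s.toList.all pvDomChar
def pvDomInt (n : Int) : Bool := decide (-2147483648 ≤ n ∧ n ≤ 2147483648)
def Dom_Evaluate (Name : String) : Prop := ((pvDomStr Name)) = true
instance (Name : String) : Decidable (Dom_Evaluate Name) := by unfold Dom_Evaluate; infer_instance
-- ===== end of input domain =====

-- B replaces A's arithmetic mod/div digit-extraction while-loop by a digit sum over the
-- decimal string representation, and the index loop with accumulator by a summed comprehension.

-- ===== PORT A =====
-- the 'while CharCode > 0' loop, carried with its Score accumulator; the fuel argument only
-- makes the recursion structural (fuel = the initial CharCode always suffices, since n/10 < n)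
def pvWhileDigits (fuel : Nat) (score : Int) (n : Nat) : Int :=
  match fuel with
  | 0 => score
  | fuel + 1 => if n > 0 then pvWhileDigits fuel (score + (n % 10 : Nat)) (n / 10) else score

def Evaluate (Name : String) : Int :=
  -- 'type(Name) != str' can never hold for a String argument; the guard is dropped
  PySem.Int.mod
    (Name.toList.foldl
      (fun score c => pvWhileDigits c.toNat (score + PySem.Int.mod ((c.toNat : Int) * 1123) 1002) c.toNat)
      0)
    101

-- ===== PORT B =====
-- sum(int(d) for d in str(n)); int(d) always succeeds on a digit char, so getD 0 is unreachable
def pvDigitSumB (n : Int) : Int :=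
  ((PySem.Int.toStr n).toList.map (fun d => (PySem.Int.ofStr? (String.ofList [d])).getD 0)).sum

def Evaluate_alt (Name : String) : Int :=
  PySem.Int.mod
    ((Name.toList.map
        (fun ch => PySem.Int.mod ((ch.toNat : Int) * 1123) 1002 + pvDigitSumB (ch.toNat : Int))).sum)
    101

-- ===== PRECONDITION & SPEC =====
def Spec_Evaluate (Name : String) (out : Int) : Prop := out = Evaluate_alt Name
instance (Name : String) (out : Int) : Decidable (Spec_Evaluate Name out) := by unfold Spec_Evaluate; infer_instance

-- ===== CLAIM (what is proved, stated in full; the proofs are below) =====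
def Claim_equal_Evaluate : Prop := ∀ (Name : String), Dom_Evaluate Name → Spec_Evaluate Name (Evaluate Name)

-- ===== LEMMAS AND PROOFS =====

theorem pvWhileDigits_shift (fuel : Nat) : ∀ (n : Nat) (s : Int),
    pvWhileDigits fuel s n = s + pvWhileDigits fuel 0 n := by
  induction fuel with
  | zero => intro n s; simp [pvWhileDigits]
  | succ fuel ih =>
    intro n s
    by_cases h : n > 0
    · simp only [pvWhileDigits, if_pos h]
      rw [ih (n / 10) (s + (n % 10 : Nat)), ih (n / 10) (0 + (n % 10 : Nat))]
      ring
    · simp [pvWhileDigits, if_neg h]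

-- on every char code admitted by the domain, the while-loop digit sum equals the string digit sum
theorem pvDigits_agree : ∀ n : Nat, n < 127 → pvWhileDigits n 0 n = pvDigitSumB (n : Int) := by
  decide

theorem pvFoldl_eq_sum (l : List Char) : ∀ s : Int,
    l.foldl (fun score c => pvWhileDigits c.toNat (score + PySem.Int.mod ((c.toNat : Int) * 1123) 1002) c.toNat) s
      = s + (l.map (fun c => PySem.Int.mod ((c.toNat : Int) * 1123) 1002 + pvWhileDigits c.toNat 0 c.toNat)).sum := by
  induction l with
  | nil => simp
  | cons c t ih =>
    intro s
    simp only [List.foldl_cons, List.map_cons, List.sum_cons]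
    rw [ih, pvWhileDigits_shift]
    ring

theorem Evaluate_spec : Claim_equal_Evaluate := by
  intro Name hDom
  unfold Spec_Evaluate Evaluate Evaluate_alt
  rw [pvFoldl_eq_sum, zero_add]
  have hmap : Name.toList.map
        (fun c => PySem.Int.mod ((c.toNat : Int) * 1123) 1002 + pvWhileDigits c.toNat 0 c.toNat)
      = Name.toList.map
        (fun ch => PySem.Int.mod ((ch.toNat : Int) * 1123) 1002 + pvDigitSumB (ch.toNat : Int)) := by
    apply List.map_congr_left
    intro c hc
    have hall := hDom
    unfold Dom_Evaluate pvDomStr at hall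
    rw [List.all_eq_true] at hall
    have hcdom := hall c hc
    unfold pvDomChar at hcdom
    have hlt : c.toNat < 127 := by
      simp only [Bool.or_eq_true, Bool.and_eq_true, decide_eq_true_eq, beq_iff_eq] at hcdom
      omega
    rw [pvDigits_agree c.toNat hlt]
  rw [hmap]
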